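-- pv_equiv track=rewrite | github.com/3n3a/Scripts | internet/subdomain_finder.py | generate_subdomains_custom
-- ===== SOURCE A (Python) =====
-- from typing import List, Set, Tuple
--
-- def generate_subdomains_custom(queries: List[str], domain: str,
--                                separators: List[str], keywords: List[str]) -> Set[str]:
--     """
--     Generate all possible subdomain combinations with custom separators and keywords.
--
--     Args:
--         queries: List of base query strings
--         domain: Main domain
--         separators: List of separators to use
--         keywords: List of keywords to append
--
--     Returns:
--         Set of generated subdomains
--     """
--     subdomains = set()
--
--     for query in queries:
--         for sep in separators:
--             for keyword in keywords:
--                 if keyword:  # keyword exists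
--                     subdomain = f"{query}{sep}{keyword}.{domain}"
--                 else:  # empty keyword
--                     subdomain = f"{query}.{domain}"
--                 subdomains.add(subdomain)
--
--     return subdomains
-- ===== SOURCE B (Python) =====
-- from typing import List, Set
--
-- def generate_subdomains_custom(queries: List[str], domain: str,
--                                separators: List[str], keywords: List[str]) -> Set[str]:
--     # Recursive decomposition: peel one query off, build that query's subdomain
--     # set in one comprehension, and union it with the recursively computed set
--     # for the remaining queries (no accumulator, no per-element branch+add loop).
--     if not queries:
--         return set()
--     head, tail = queries[0], queries[1:]
--     block = {head + (sep + kw if kw else "") + "." + domain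
--              for sep in separators for kw in keywords}
--     return block | generate_subdomains_custom(tail, domain, separators, keywords)
-- ===== Notes on version B (the rewrite author's own statement) =====
-- stated objective: alternative
-- what changed: B replaces A's iterative triple loop with a branchy per-element set.add accumulator by structural recursion on the query list: each step builds the head query's whole subdomain set in one comprehension (empty-keyword case folded into the string expression) and unions it with the recursive result for the remaining queries.
import Mathlib
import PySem

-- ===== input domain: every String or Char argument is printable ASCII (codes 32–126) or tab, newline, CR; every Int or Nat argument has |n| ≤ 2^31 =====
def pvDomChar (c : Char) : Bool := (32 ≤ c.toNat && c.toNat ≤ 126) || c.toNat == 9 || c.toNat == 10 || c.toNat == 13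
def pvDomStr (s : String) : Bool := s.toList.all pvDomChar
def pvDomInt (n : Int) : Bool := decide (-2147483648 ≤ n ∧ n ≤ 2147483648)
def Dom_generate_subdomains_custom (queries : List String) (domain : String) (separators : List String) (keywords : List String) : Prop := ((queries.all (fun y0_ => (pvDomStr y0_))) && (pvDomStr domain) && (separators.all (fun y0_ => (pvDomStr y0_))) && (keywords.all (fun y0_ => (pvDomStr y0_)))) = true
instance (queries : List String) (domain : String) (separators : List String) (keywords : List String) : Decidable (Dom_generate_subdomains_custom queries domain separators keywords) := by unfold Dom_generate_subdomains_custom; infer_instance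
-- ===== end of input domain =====

-- ===== PORT A =====
-- Header: B computes the same set by structural recursion on the query list — each step builds
-- the head query's block in one comprehension (the empty-keyword case folded into the string
-- expression) and unions it with the recursive result — instead of A's accumulator triple loop
-- with a per-element branch and set.add (objective: alternative decomposition, same cost).
def generate_subdomains_custom (queries : List String) (domain : String) (separators : List String) (keywords : List String) : List String :=
  queries.foldl (fun subdomains query =>
    separators.foldl (fun subdomains sep =>
      keywords.foldl (fun subdomains keyword =>
        PySem.Set.add subdomains
          (if keyword ≠ "" then query ++ sep ++ keyword ++ "." ++ domain
           else query ++ "." ++ domain)) subdomains) subdomains)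
    PySem.Set.empty

-- ===== PORT B =====
def generate_subdomains_custom_alt (queries : List String) (domain : String) (separators : List String) (keywords : List String) : List String :=
  match queries with
  | [] => PySem.Set.empty
  | head :: tail =>
    let block := PySem.Set.ofList (separators.flatMap (fun sep =>
      keywords.map (fun kw => head ++ (if kw ≠ "" then sep ++ kw else "") ++ "." ++ domain)))
    PySem.Set.union block (generate_subdomains_custom_alt tail domain separators keywords)

-- ===== PRECONDITION & SPEC =====
def Spec_generate_subdomains_custom (queries : List String) (domain : String) (separators : List String) (keywords : List String) (out : List String) : Prop := out = generate_subdomains_custom_alt queries domain separators keywords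
instance (queries : List String) (domain : String) (separators : List String) (keywords : List String) (out : List String) : Decidable (Spec_generate_subdomains_custom queries domain separators keywords out) := by unfold Spec_generate_subdomains_custom; infer_instance

-- ===== CLAIM (what is proved, stated in full; the proofs are below) =====
def Claim_equal_generate_subdomains_custom : Prop := ∀ (queries : List String) (domain : String) (separators : List String) (keywords : List String), Dom_generate_subdomains_custom queries domain separators keywords → Spec_generate_subdomains_custom queries domain separators keywords (generate_subdomains_custom queries domain separators keywords)

-- ===== LEMMAS AND PROOFS =====

-- foldl over a flatMap is the nested foldl (the shape of A's nested loops over a product list)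
theorem pv_foldl_flatMap {α β γ : Type} (f : α → List β) (g : γ → β → γ) (xs : List α) (i : γ) :
    (xs.flatMap f).foldl g i = xs.foldl (fun a x => (f x).foldl g a) i := by
  induction xs generalizing i with
  | nil => rfl
  | cons x xs ih => simp [List.flatMap_cons, List.foldl_append, ih]

-- adding elements already filtered against a member of s changes nothing
theorem pv_update_discard {α : Type} [BEq α] [LawfulBEq α] (l : List α) (s : PySem.Set α)
    (y : α) (hy : y ∈ s) :
    PySem.Set.update s (PySem.Set.discard l y) = PySem.Set.update s l := by
  induction l generalizing s with
  | nil => rfl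
  | cons x r ih =>
    by_cases h : x = y
    · subst h
      simp [PySem.Set.discard, PySem.Set.update, PySem.Set.add_of_mem hy] at *
      exact ih s hy
    · simp [PySem.Set.discard, PySem.Set.update, h] at *
      exact ih (PySem.Set.add s x) (by simp [PySem.Set.mem_add, hy])

-- updating with the deduplicated list is the same as updating with the list
theorem pv_update_ofList {α : Type} [BEq α] [LawfulBEq α] (ys : List α) (s : PySem.Set α) :
    PySem.Set.update s (PySem.Set.ofList ys) = PySem.Set.update s ys := by
  induction ys generalizing s with
  | nil => rfl
  | cons y t ih =>
    rw [PySem.Set.ofList_cons]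
    show PySem.Set.update (PySem.Set.add s y) (PySem.Set.discard (PySem.Set.ofList t) y)
        = PySem.Set.update (PySem.Set.add s y) t
    rw [pv_update_discard _ _ _ (by simp [PySem.Set.mem_add]), ih]

-- B's recursion computes the first-occurrence dedup of the full candidate list
theorem pv_alt_eq_ofList (queries : List String) (domain : String)
    (separators : List String) (keywords : List String) :
    generate_subdomains_custom_alt queries domain separators keywords
      = PySem.Set.ofList (queries.flatMap (fun q => separators.flatMap (fun sep =>
          keywords.map (fun kw => q ++ (if kw ≠ "" then sep ++ kw else "") ++ "." ++ domain)))) := by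
  induction queries with
  | nil => rfl
  | cons q t ih =>
    rw [List.flatMap_cons, PySem.Set.ofList_append]
    show PySem.Set.union _ _ = _
    rw [ih]
    show PySem.Set.update _ (PySem.Set.ofList _) = _
    rw [pv_update_ofList]

-- ===== VERDICT (by name: the statement is the Claim_ definition above) =====
theorem generate_subdomains_custom_spec : Claim_equal_generate_subdomains_custom := by
  intro queries domain separators keywords _
  unfold Spec_generate_subdomains_custom
  rw [pv_alt_eq_ofList]
  unfold generate_subdomains_custom
  have hstr : ∀ (q sep kw : String),
      q ++ ((if kw ≠ "" then sep ++ kw else "") ++ ("." ++ domain))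
      = (if kw ≠ "" then q ++ (sep ++ (kw ++ ("." ++ domain))) else q ++ ("." ++ domain)) := by
    intro q sep kw
    by_cases h : kw = "" <;>
      simp [h, String.append_assoc, String.empty_append]
  rw [PySem.Set.ofList_eq_foldl, pv_foldl_flatMap]
  simp only [pv_foldl_flatMap, List.foldl_map, hstr, String.append_assoc]
  rfl
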